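-- pv_equiv track=rewrite | github.com/fwoodruff/ECDH | TypeConversion.py | b58toInt
-- ===== SOURCE A (Python) =====
-- alphabet = '123456789abcdefghijkmnopqrstuvwxyzABCDEFGHJKLMNPQRSTUVWXYZ'
--
-- base_count = len(alphabet)
--
-- def b58toInt(s58):
--     '''
--     maps a base-58 string to an integer
--     '''
--     i = 0
--     multi = 1
--     s58 = s58[::-1]
--     for char in s58:
--         i += multi * alphabet.index(char)
--         multi = multi * base_count
--     return i
-- ===== SOURCE B (Python) =====
-- alphabet = '123456789abcdefghijkmnopqrstuvwxyzABCDEFGHJKLMNPQRSTUVWXYZ'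
--
-- base_count = len(alphabet)
--
-- def b58toInt(s58):
--     '''
--     maps a base-58 string to an integer (Horner's method, forward pass)
--     '''
--     i = 0
--     for char in s58:
--         i = i * base_count + alphabet.index(char)
--     return i
-- ===== Notes on version B (the rewrite author's own statement) =====
-- stated objective: idiomatic
-- what changed: Replaces A's string reversal plus a separately maintained running power-of-58 accumulator with a forward single-accumulator Horner pass.
import Mathlib
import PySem

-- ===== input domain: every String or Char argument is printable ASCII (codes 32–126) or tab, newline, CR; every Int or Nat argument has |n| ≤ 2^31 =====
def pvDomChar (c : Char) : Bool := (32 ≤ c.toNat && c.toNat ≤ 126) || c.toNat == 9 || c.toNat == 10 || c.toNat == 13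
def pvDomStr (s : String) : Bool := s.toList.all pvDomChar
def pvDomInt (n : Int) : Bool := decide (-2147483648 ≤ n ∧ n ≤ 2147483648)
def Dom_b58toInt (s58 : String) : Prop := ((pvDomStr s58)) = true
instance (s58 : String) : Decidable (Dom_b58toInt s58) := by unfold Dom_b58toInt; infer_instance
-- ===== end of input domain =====

-- B replaces A's string reversal + running power-of-58 accumulator with a forward Horner pass (more idiomatic; same asymptotic cost).
-- Pre_b58toInt excludes strings with a character outside the alphabet, where Python's str.index raises ValueError (in both A and B).


-- shared module constants (alphabet, base_count = len(alphabet))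
def pvAlphabet : List Char := "123456789abcdefghijkmnopqrstuvwxyzABCDEFGHJKLMNPQRSTUVWXYZ".toList
def pvBaseCount : Int := (pvAlphabet.length : Int)
-- alphabet.index(char); Python raises ValueError when char is absent — Pre_ excludes that, the getD 0 is never reached there
def pvIdx (c : Char) : Int := ((PySem.List.index? pvAlphabet c).getD 0 : Nat)

-- ===== PORT A =====
-- s58[::-1] then a forward loop over it, with state (i, multi)
def b58toInt (s58 : String) : Int :=
  (s58.toList.reverse.foldl
    (fun (st : Int × Int) c => (st.1 + st.2 * pvIdx c, st.2 * pvBaseCount)) ((0 : Int), (1 : Int))).1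

-- ===== PORT B =====
-- forward Horner pass, single accumulator
def b58toInt_alt (s58 : String) : Int :=
  s58.toList.foldl (fun (i : Int) c => i * pvBaseCount + pvIdx c) 0

-- ===== PRECONDITION & SPEC =====
-- excludes exactly the strings with a character not in the alphabet: there Python's alphabet.index raises ValueError (in A and in B)
def Pre_b58toInt (s58 : String) : Prop := s58.toList.all (fun c => pvAlphabet.contains c) = true
instance (s58 : String) : Decidable (Pre_b58toInt s58) := by unfold Pre_b58toInt; infer_instance
def pvWitness_b58toInt : String := "z9"
def Spec_b58toInt (s58 : String) (out : Int) : Prop := out = b58toInt_alt s58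
instance (s58 : String) (out : Int) : Decidable (Spec_b58toInt s58 out) := by unfold Spec_b58toInt; infer_instance

-- ===== CLAIM (what is proved, stated in full; the proofs are below) =====
def Claim_equal_b58toInt : Prop := ∀ (s58 : String), Dom_b58toInt s58 → Pre_b58toInt s58 → Spec_b58toInt s58 (b58toInt s58)

-- ===== LEMMAS AND PROOFS =====

-- little-endian value of a digit list
def pvVal : List Char → Int
  | [] => 0
  | c :: t => pvIdx c + pvBaseCount * pvVal t

theorem pvA_fold (l : List Char) : ∀ (i m : Int),
    l.foldl (fun (st : Int × Int) c => (st.1 + st.2 * pvIdx c, st.2 * pvBaseCount)) (i, m)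
      = (i + m * pvVal l, m * pvBaseCount ^ l.length) := by
  induction l with
  | nil => intro i m; simp [pvVal]
  | cons c t ih =>
      intro i m
      simp only [List.foldl_cons, ih, pvVal, List.length_cons]
      exact Prod.ext (by ring) (by ring)

theorem pvVal_append_singleton (l : List Char) (c : Char) :
    pvVal (l ++ [c]) = pvVal l + pvIdx c * pvBaseCount ^ l.length := by
  induction l with
  | nil => simp [pvVal]
  | cons d t ih => simp only [List.cons_append, pvVal, ih, List.length_cons]; ring

theorem pvB_fold (l : List Char) : ∀ (i : Int),
    l.foldl (fun (i : Int) c => i * pvBaseCount + pvIdx c) i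
      = i * pvBaseCount ^ l.length + pvVal l.reverse := by
  induction l with
  | nil => intro i; simp [pvVal]
  | cons c t ih =>
      intro i
      simp only [List.foldl_cons, ih, List.reverse_cons, pvVal_append_singleton,
        List.length_reverse, List.length_cons]
      ring

-- ===== VERDICT (by name: the statement is the Claim_ definition above) =====
theorem b58toInt_spec : Claim_equal_b58toInt := by
  intro s58 _ _
  unfold Spec_b58toInt b58toInt b58toInt_alt
  rw [pvA_fold, pvB_fold]
  simp
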